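-- pv_equiv track=rewrite | github.com/thaixx/dio-python-classes | fila_atendimento.py | ordenar_pacientes
-- ===== SOURCE A (Python) =====
-- def ordenar_pacientes(pacientes):
--     pacientes_ordenados_idade = sorted(pacientes, key=lambda x: x[1], reverse=True)
--     urgentes = []
--     idosos = []
--     demais = []
--     for p in pacientes_ordenados_idade:
--         if p[2] == "urgente" and p[1] >=60:
--             urgentes.append(p)
--         elif p[2] == "urgente" and p[1] <60:
--             urgentes.append(p)
--         elif p[1] >= 60:
--             idosos.append(p)
--         else:
--             demais.append(p)
--
--     return urgentes + idosos + demais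
-- ===== SOURCE B (Python) =====
-- def ordenar_pacientes(pacientes):
--     urgentes = [p for p in pacientes if p[2] == "urgente"]
--     idosos = [p for p in pacientes if p[2] != "urgente" and p[1] >= 60]
--     demais = [p for p in pacientes if p[2] != "urgente" and p[1] < 60]
--     por_idade = lambda grupo: sorted(grupo, key=lambda x: x[1], reverse=True)
--     return por_idade(urgentes) + por_idade(idosos) + por_idade(demais)
-- ===== Notes on version B (the rewrite author's own statement) =====
-- stated objective: alternative
-- what changed: A sorts the whole list by age (descending) and then runs a partition loop over the sorted list into three groups before concatenating; B partitions the raw input into the three priority groups first (three filters, no loop state) and sorts each small group by age descending, concatenating the results.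
import Mathlib
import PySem

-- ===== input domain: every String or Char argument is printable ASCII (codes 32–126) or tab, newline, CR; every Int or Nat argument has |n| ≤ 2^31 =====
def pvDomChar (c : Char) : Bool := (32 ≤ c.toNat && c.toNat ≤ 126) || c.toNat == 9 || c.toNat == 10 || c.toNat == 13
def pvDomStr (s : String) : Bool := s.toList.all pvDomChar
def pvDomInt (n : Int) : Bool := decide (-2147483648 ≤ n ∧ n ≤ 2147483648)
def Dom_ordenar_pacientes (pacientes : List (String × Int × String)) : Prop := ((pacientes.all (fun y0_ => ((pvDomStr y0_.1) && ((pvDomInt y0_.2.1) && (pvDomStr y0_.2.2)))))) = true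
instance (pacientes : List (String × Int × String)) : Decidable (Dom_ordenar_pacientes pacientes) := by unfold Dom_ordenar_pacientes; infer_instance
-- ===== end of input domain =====

-- B partitions first into the three priority groups and sorts each group by age descending,
-- instead of A's whole-list sort followed by a partition loop; objective: alternative decomposition.


-- ===== PORT A =====
-- sorted(pacientes, key=lambda x: x[1], reverse=True), then one partition loop, then concatenation.
def ordenar_pacientes (pacientes : List (String × Int × String)) : List (String × Int × String) :=
  let pacientes_ordenados_idade := PySem.List.sorted pacientes (fun x => x.2.1) true
  let r := pacientes_ordenados_idade.foldl
    (fun (acc : List (String × Int × String) × List (String × Int × String) × List (String × Int × String)) p =>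
      if p.2.2 == "urgente" && decide (60 ≤ p.2.1) then (acc.1 ++ [p], acc.2.1, acc.2.2)
      else if p.2.2 == "urgente" && decide (p.2.1 < 60) then (acc.1 ++ [p], acc.2.1, acc.2.2)
      else if decide (60 ≤ p.2.1) then (acc.1, acc.2.1 ++ [p], acc.2.2)
      else (acc.1, acc.2.1, acc.2.2 ++ [p]))
    ([], [], [])
  r.1 ++ r.2.1 ++ r.2.2

-- ===== PORT B =====
-- three filters of the raw input, each sorted by age descending, concatenated.
def ordenar_pacientes_alt (pacientes : List (String × Int × String)) : List (String × Int × String) :=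
  let urgentes := pacientes.filter (fun p => p.2.2 == "urgente")
  let idosos := pacientes.filter (fun p => !(p.2.2 == "urgente") && decide (60 ≤ p.2.1))
  let demais := pacientes.filter (fun p => !(p.2.2 == "urgente") && decide (p.2.1 < 60))
  PySem.List.sorted urgentes (fun x => x.2.1) true
    ++ PySem.List.sorted idosos (fun x => x.2.1) true
    ++ PySem.List.sorted demais (fun x => x.2.1) true

-- ===== PRECONDITION & SPEC =====
def Spec_ordenar_pacientes (pacientes : List (String × Int × String)) (out : List (String × Int × String)) : Prop := out = ordenar_pacientes_alt pacientes
instance (pacientes : List (String × Int × String)) (out : List (String × Int × String)) : Decidable (Spec_ordenar_pacientes pacientes out) := by unfold Spec_ordenar_pacientes; infer_instance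

-- ===== CLAIM (what is proved, stated in full; the proofs are below) =====
def Claim_equal_ordenar_pacientes : Prop := ∀ (pacientes : List (String × Int × String)), Dom_ordenar_pacientes pacientes → Spec_ordenar_pacientes pacientes (ordenar_pacientes pacientes)

-- ===== LEMMAS AND PROOFS =====

-- inserting an element that goes before everything puts it at the head
theorem insertBy_head {α : Type} (before : α → α → Bool) (x : α) (zs : List α)
    (h : ∀ z ∈ zs, before x z = true) :
    PySem.List.insertBy before x zs = x :: zs := by
  cases zs with
  | nil => rfl
  | cons z zs =>
    simp [PySem.List.insertBy, h z (List.mem_cons_self)]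

-- one more element on the right of a reverse sort is one stable insertion
theorem sorted_rev_append_singleton {α : Type} (l : List α) (x : α) (k : α → Int) :
    PySem.List.sorted (l ++ [x]) k true
      = PySem.List.insertBy (fun a b => decide (k b < k a)) x (PySem.List.sorted l k true) := by
  rw [PySem.List.sorted_rev_eq_foldl_insertBy, PySem.List.sorted_rev_eq_foldl_insertBy,
      List.foldl_append]
  rfl

-- filtering commutes with one stable (reverse-order) insertion into an already-descending list
theorem filter_insertBy {α : Type} (k : α → Int) (c : α → Bool) (x : α) (ys : List α)
    (hys : ys.Pairwise (fun a b => k b ≤ k a)) :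
    (PySem.List.insertBy (fun a b => decide (k b < k a)) x ys).filter c =
      if c x then PySem.List.insertBy (fun a b => decide (k b < k a)) x (ys.filter c)
      else ys.filter c := by
  induction ys with
  | nil => by_cases hcx : c x <;> simp [PySem.List.insertBy, hcx]
  | cons y ys ih =>
    rcases List.pairwise_cons.mp hys with ⟨hy, hys'⟩
    by_cases hlt : k y < k x
    · -- x is inserted right before y
      simp only [PySem.List.insertBy, decide_eq_true_eq, if_pos hlt]
      by_cases hcx : c x
      · by_cases hcy : c y
        · simp [hcx, hcy, PySem.List.insertBy, hlt]
        · have hall : ∀ z ∈ ys.filter c, (fun a b => decide (k b < k a)) x z = true := by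
            intro z hz
            have := hy z (List.mem_of_mem_filter hz)
            simp only [decide_eq_true_eq]; omega
          have h2 := insertBy_head (fun a b => decide (k b < k a)) x (ys.filter c) hall
          simp [List.filter_cons, hcx, hcy, h2]
      · simp [List.filter_cons, hcx]
    · -- x passes y
      simp only [PySem.List.insertBy, decide_eq_true_eq, if_neg hlt]
      by_cases hcy : c y
      · simp only [List.filter_cons, hcy, if_pos]
        rw [ih hys']
        by_cases hcx : c x
        · simp [hcx, PySem.List.insertBy, hlt]
        · simp [hcx]
      · simp only [List.filter_cons, hcy, Bool.false_eq_true, if_neg]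
        rw [ih hys']
        simp [List.filter_cons, hcy]

-- filtering commutes with the whole stable descending sort
theorem filter_sorted {α : Type} (xs : List α) (k : α → Int) (c : α → Bool) :
    (PySem.List.sorted xs k true).filter c = PySem.List.sorted (xs.filter c) k true := by
  induction xs using List.reverseRecOn with
  | nil => rfl
  | append_singleton l x ih =>
    rw [sorted_rev_append_singleton,
        filter_insertBy k c x _ (PySem.List.sorted_pairwise_rev l k), ih]
    by_cases hcx : c x
    · have hfx : List.filter c (l ++ [x]) = List.filter c l ++ [x] := by simp [hcx]
      rw [if_pos hcx, hfx, sorted_rev_append_singleton]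
    · have hfx : List.filter c (l ++ [x]) = List.filter c l := by simp [hcx]
      rw [if_neg hcx, hfx]

-- the partition loop of A is the three filters of its input
theorem fold3_eq_filters (xs : List (String × Int × String))
    (a b c : List (String × Int × String)) :
    xs.foldl
      (fun (acc : List (String × Int × String) × List (String × Int × String) × List (String × Int × String)) p =>
        if p.2.2 == "urgente" && decide (60 ≤ p.2.1) then (acc.1 ++ [p], acc.2.1, acc.2.2)
        else if p.2.2 == "urgente" && decide (p.2.1 < 60) then (acc.1 ++ [p], acc.2.1, acc.2.2)
        else if decide (60 ≤ p.2.1) then (acc.1, acc.2.1 ++ [p], acc.2.2)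
        else (acc.1, acc.2.1, acc.2.2 ++ [p]))
      (a, b, c)
    = (a ++ xs.filter (fun p => p.2.2 == "urgente"),
       b ++ xs.filter (fun p => !(p.2.2 == "urgente") && decide (60 ≤ p.2.1)),
       c ++ xs.filter (fun p => !(p.2.2 == "urgente") && decide (p.2.1 < 60))) := by
  induction xs generalizing a b c with
  | nil => simp
  | cons p xs ih =>
    simp only [List.foldl_cons]
    by_cases hu : p.2.2 == "urgente"
    · by_cases hge : 60 ≤ p.2.1
      · rw [if_pos (by simp [hu, hge]), ih]
        simp [List.filter_cons, hu, hge]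
      · rw [if_neg (by simp [hge]), if_pos (by simp [hu]; omega), ih]
        simp [List.filter_cons, hu, hge]
    · by_cases hge : 60 ≤ p.2.1
      · rw [if_neg (by simp [hu]), if_neg (by simp [hu]), if_pos (by simpa using hge), ih]
        simp [List.filter_cons, hu, hge, show ¬ p.2.1 < 60 by omega]
      · rw [if_neg (by simp [hu]), if_neg (by simp [hu]), if_neg (by simpa using hge), ih]
        simp [List.filter_cons, hu, hge, show p.2.1 < 60 by omega]

-- ===== VERDICT (by name: the statement is the Claim_ definition above) =====
theorem ordenar_pacientes_spec : Claim_equal_ordenar_pacientes := by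
  intro pacientes _
  unfold Spec_ordenar_pacientes ordenar_pacientes ordenar_pacientes_alt
  simp only [fold3_eq_filters, List.nil_append, filter_sorted]
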